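-- pv_equiv track=rewrite | github.com/gangpeng/zmq | tests/chaos_test.py | env_phase_token
-- ===== SOURCE A (Python) =====
-- class TestError(Exception):
--     pass
--
-- def env_phase_token(name):
--     token = []
--     for ch in name.upper():
--         if ch.isalnum():
--             token.append(ch)
--         else:
--             token.append("_")
--     collapsed = "_".join(part for part in "".join(token).split("_") if part)
--     if not collapsed:
--         raise TestError("empty chaos matrix phase name")
--     return collapsed
-- ===== SOURCE B (Python) =====
-- class TestError(Exception):
--     pass
--
-- def env_phase_token(name):
--     out = []
--     prev_sep = False
--     for ch in name.upper():
--         if ch.isalnum():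
--             out.append(ch)
--             prev_sep = False
--         elif out and not prev_sep:
--             out.append("_")
--             prev_sep = True
--     if prev_sep:
--         out.pop()
--     if not out:
--         raise TestError("empty chaos matrix phase name")
--     return "".join(out)
-- ===== Notes on version B (the rewrite author's own statement) =====
-- stated objective: alternative
-- what changed: B replaces A's two-phase pipeline (mark every char as itself or '_', then split on '_', filter empties and rejoin) with a single-pass state machine that emits alphanumeric chars directly and at most one pending '_' between groups.
import Mathlib
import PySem

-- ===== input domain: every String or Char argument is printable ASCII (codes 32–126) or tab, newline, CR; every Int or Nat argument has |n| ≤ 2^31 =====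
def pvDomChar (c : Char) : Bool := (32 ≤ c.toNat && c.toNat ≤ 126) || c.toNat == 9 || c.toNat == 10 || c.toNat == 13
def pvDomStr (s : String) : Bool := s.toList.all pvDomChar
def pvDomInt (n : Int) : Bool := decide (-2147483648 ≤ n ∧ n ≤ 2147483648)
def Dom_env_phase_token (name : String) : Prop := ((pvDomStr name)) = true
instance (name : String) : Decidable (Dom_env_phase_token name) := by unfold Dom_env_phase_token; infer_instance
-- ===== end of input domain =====

-- B replaces A's two-phase mark-then-split/filter/join collapse with a one-pass state machine
-- (emit alnum chars, emit at most one pending '_' between groups); equal return value everywhere A returns.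

-- ===== PORT A =====
def env_phase_token (name : String) : String :=
  let token : List Char :=
    (PySem.Str.upper name).toList.foldl
      (fun acc ch => if PySem.Chars.isalnum ch then acc ++ [ch] else acc ++ ['_']) []
  let collapsed : List Char :=
    PySem.Chars.join ['_'] ((PySem.Chars.splitOn token ['_']).filter (fun part => !part.isEmpty))
  String.ofList collapsed

-- ===== PORT B =====
def bMachine : List Char → List Char → Bool → List Char × Bool
  | [], out, prevSep => (out, prevSep)
  | ch :: rest, out, prevSep =>
    if PySem.Chars.isalnum ch then bMachine rest (out ++ [ch]) false
    else if !out.isEmpty && !prevSep then bMachine rest (out ++ ['_']) true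
    else bMachine rest out prevSep

def env_phase_token_alt (name : String) : String :=
  let st := bMachine (PySem.Str.upper name).toList [] false
  let out := if st.2 then st.1.dropLast else st.1
  String.ofList out

-- ===== PRECONDITION & SPEC =====
-- Pre_ excludes exactly the inputs whose uppercased form has no alphanumeric character,
-- on which the Python A raises TestError (and B raises the same TestError).
def Pre_env_phase_token (name : String) : Prop :=
  ((PySem.Chars.upper name.toList).any PySem.Chars.isalnum) = true
instance (name : String) : Decidable (Pre_env_phase_token name) := by
  unfold Pre_env_phase_token; infer_instance
def pvWitness_env_phase_token : String := "a b"

def Spec_env_phase_token (name : String) (out : String) : Prop := out = env_phase_token_alt name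
instance (name : String) (out : String) : Decidable (Spec_env_phase_token name out) := by unfold Spec_env_phase_token; infer_instance

-- ===== CLAIM (what is proved, stated in full; the proofs are below) =====
def Claim_equal_env_phase_token : Prop := ∀ (name : String), Dom_env_phase_token name → Pre_env_phase_token name → Spec_env_phase_token name (env_phase_token name)

-- ===== LEMMAS AND PROOFS =====

-- A's per-char marking: alnum chars kept, everything else becomes '_'
def pvF (c : Char) : Char := if PySem.Chars.isalnum c then c else '_'

-- structural form of str.split('_') on a char list (pre = chars of the part being built)
def pvSplit : List Char → List Char → List (List Char)
  | pre, [] => [pre]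
  | pre, c :: t => if c = '_' then pre :: pvSplit [] t else pvSplit (pre ++ [c]) t

-- the machine's continuation: what B will still emit, given whether a separator is pending
def pvK : Bool → List Char → List Char
  | _, [] => []
  | false, c :: t => if PySem.Chars.isalnum c then c :: pvK false t else pvK true t
  | true, c :: t => if PySem.Chars.isalnum c then '_' :: c :: pvK false t else pvK true t

-- the machine's output from the initial (empty, no-separator) state
def pvE : List Char → List Char
  | [] => []
  | c :: t => if PySem.Chars.isalnum c then c :: pvK false t else pvE t

def pvFin (st : List Char × Bool) : List Char := if st.2 then st.1.dropLast else st.1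

lemma pvF_ne (c : Char) (h : PySem.Chars.isalnum c = true) : c ≠ '_' := by
  intro hc; subst hc; exact absurd h (by decide)

lemma pv_go (fuel : Nat) : ∀ (l cur : List Char) (acc : List (List Char)), l.length ≤ fuel →
    PySem.Chars.splitOn.go ['_'] fuel l cur acc = acc.reverse ++ pvSplit cur.reverse l := by
  induction fuel with
  | zero =>
    intro l cur acc h
    have : l = [] := by cases l <;> simp_all
    subst this
    simp [PySem.Chars.splitOn.go, pvSplit]
  | succ n ih =>
    intro l cur acc h
    cases l with
    | nil => simp [PySem.Chars.splitOn.go, pvSplit]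
    | cons c rest =>
      simp only [PySem.Chars.splitOn.go, List.isPrefixOf, Bool.and_true]
      by_cases hc : c = '_'
      · subst hc
        simp only [beq_self_eq_true, if_pos]
        have hd : List.drop (['_'].length) ('_' :: rest) = rest := rfl
        rw [hd, ih rest [] (cur.reverse :: acc) (by simpa using Nat.le_of_succ_le_succ h)]
        simp [pvSplit]
      · have : ('_' == c) = false := by simpa using fun h' => hc h'.symm
        simp only [this, if_neg, Bool.false_eq_true, not_false_iff]
        rw [ih rest (c :: cur) acc (by simpa using Nat.le_of_succ_le_succ h)]
        simp [pvSplit, hc]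

lemma pv_splitOn (t : List Char) : PySem.Chars.splitOn t ['_'] = pvSplit [] t := by
  have := pv_go (t.length + 1) t [] [] (by omega)
  simpa [PySem.Chars.splitOn] using this

lemma pv_ne : ∀ (cs : List Char) (pre : List Char), pre ≠ [] →
    (pvSplit pre (cs.map pvF)).filter (fun p => !p.isEmpty) ≠ [] := by
  intro cs
  induction cs with
  | nil => intro pre hpre; simp [pvSplit, hpre]
  | cons c t ih =>
    intro pre hpre
    by_cases h : PySem.Chars.isalnum c = true
    · simpa [pvSplit, pvF, h, pvF_ne c h] using ih (pre ++ [c]) (by simp)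
    · simp only [List.map_cons, pvF, h, if_neg, Bool.false_eq_true, not_false_iff, pvSplit,
        if_pos, List.filter_cons]
      simp [hpre]

lemma pv_joint : ∀ (cs : List Char),
    (∀ pre : List Char, pre ≠ [] →
      PySem.Chars.join ['_'] ((pvSplit pre (cs.map pvF)).filter (fun p => !p.isEmpty))
        = pre ++ pvK false cs)
    ∧ ((if (pvSplit [] (cs.map pvF)).filter (fun p => !p.isEmpty) = [] then ([] : List Char)
        else '_' :: PySem.Chars.join ['_'] ((pvSplit [] (cs.map pvF)).filter (fun p => !p.isEmpty)))
        = pvK true cs) := by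
  intro cs
  induction cs with
  | nil =>
    constructor
    · intro pre hpre
      simp [pvSplit, pvK, hpre, PySem.Chars.join_singleton]
    · simp [pvSplit, pvK]
  | cons c t ih =>
    by_cases h : PySem.Chars.isalnum c = true
    · constructor
      · intro pre hpre
        rw [List.map_cons]
        simp only [pvF, h, if_pos, pvSplit, pvF_ne c h, if_neg, not_false_iff]
        rw [ih.1 (pre ++ [c]) (by simp)]
        simp [pvK, h]
      · rw [List.map_cons]
        simp only [pvF, h, if_pos, pvSplit, pvF_ne c h, if_neg, not_false_iff, List.nil_append]
        have hne := pv_ne t [c] (by simp)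
        rw [if_neg hne, ih.1 [c] (by simp)]
        simp [pvK, h]
    · have hF : pvF c = '_' := by simp [pvF, h]
      constructor
      · intro pre hpre
        rw [List.map_cons, hF]
        simp only [pvSplit, if_pos, List.filter_cons]
        have hpre' : (!pre.isEmpty) = true := by simpa using hpre
        rw [hpre']
        simp only [if_pos]
        by_cases hG : (pvSplit [] (t.map pvF)).filter (fun p => !p.isEmpty) = []
        · have h2 := ih.2
          rw [if_pos hG] at h2
          rw [hG]
          simp [pvK, h, PySem.Chars.join_singleton, ← h2]
        · obtain ⟨q, r, hqr⟩ := List.exists_cons_of_ne_nil hG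
          have h2 := ih.2
          rw [if_neg hG] at h2
          rw [hqr] at h2 ⊢
          rw [PySem.Chars.join_cons_cons]
          simp only [pvK, h, Bool.false_eq_true, if_neg, not_false_iff]
          rw [← h2]
          simp
      · rw [List.map_cons, hF]
        simp only [pvSplit, if_pos, List.filter_cons]
        simpa [pvK, h] using ih.2

lemma pv_top_A : ∀ (cs : List Char),
    PySem.Chars.join ['_'] ((pvSplit [] (cs.map pvF)).filter (fun p => !p.isEmpty)) = pvE cs := by
  intro cs
  induction cs with
  | nil => simp [pvSplit, pvE]
  | cons c t ih =>
    by_cases h : PySem.Chars.isalnum c = true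
    · rw [List.map_cons]
      simp only [pvF, h, if_pos, pvSplit, pvF_ne c h, if_neg, not_false_iff, List.nil_append]
      rw [(pv_joint t).1 [c] (by simp)]
      simp [pvE, h]
    · have hF : pvF c = '_' := by simp [pvF, h]
      rw [List.map_cons, hF]
      simp only [pvSplit, if_pos, List.filter_cons]
      simpa [pvE, h] using ih

lemma pv_b : ∀ (cs : List Char) (out : List Char), out ≠ [] →
    pvFin (bMachine cs out false) = out ++ pvK false cs
    ∧ pvFin (bMachine cs (out ++ ['_']) true) = out ++ pvK true cs := by
  intro cs
  induction cs with
  | nil =>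
    intro out hout
    constructor
    · simp [bMachine, pvFin, pvK]
    · simp [bMachine, pvFin, pvK]
  | cons c t ih =>
    intro out hout
    by_cases h : PySem.Chars.isalnum c = true
    · constructor
      · simp only [bMachine, h, if_pos]
        rw [(ih (out ++ [c]) (by simp)).1]
        simp [pvK, h]
      · simp only [bMachine, h, if_pos]
        rw [(ih (out ++ ['_'] ++ [c]) (by simp)).1]
        simp [pvK, h]
    · have hout' : (!out.isEmpty) = true := by simpa using hout
      constructor
      · simp only [bMachine, h, Bool.false_eq_true, if_neg, not_false_iff, hout',
          Bool.not_false, Bool.and_true, if_pos]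
        rw [(ih out hout).2]
        simp [pvK, h]
      · simp only [bMachine, h, Bool.false_eq_true, if_neg, not_false_iff,
          Bool.not_true, Bool.and_false]
        rw [(ih out hout).2]
        simp [pvK, h]
  
lemma pv_b_top : ∀ (cs : List Char), pvFin (bMachine cs [] false) = pvE cs := by
  intro cs
  induction cs with
  | nil => simp [bMachine, pvFin, pvE]
  | cons c t ih =>
    by_cases h : PySem.Chars.isalnum c = true
    · simp only [bMachine, h, if_pos]
      have := (pv_b t [c] (by simp)).1
      simpa [pvE, h] using this
    · simpa [bMachine, h, pvE] using ih

lemma pv_token : ∀ (u : List Char) (acc : List Char),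
    u.foldl (fun acc ch => if PySem.Chars.isalnum ch then acc ++ [ch] else acc ++ ['_']) acc
      = acc ++ u.map pvF := by
  intro u
  induction u with
  | nil => simp
  | cons c t ih =>
    intro acc
    by_cases h : PySem.Chars.isalnum c = true
    · simp [List.foldl_cons, h, ih, pvF]
    · simp [List.foldl_cons, h, ih, pvF]

-- ===== VERDICT (by name: the statement is the Claim_ definition above) =====
theorem env_phase_token_spec : Claim_equal_env_phase_token := by
  intro name _ _
  show env_phase_token name = env_phase_token_alt name
  simp only [env_phase_token, env_phase_token_alt, pv_token, List.nil_append, pv_splitOn]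
  rw [pv_top_A, ← pv_b_top]
  simp [pvFin]
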